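-- pv_equiv track=rewrite | github.com/onikss793/algo | strings/group_words_checker.py | count_group_character
-- ===== SOURCE A (Python) =====
-- def count_group_character(word):
--     length = len(word)
--     count = 0
--
--     for n in range(length):
--         character = word[n] # 단어의 글자를 차례대로 character에 저장한다
--
--         if character in word[n + 1:]:    # character 다음에 똑같은 글자가 있다면?
--             if word[n + 1] != character: # character 다음 글자가 character 와 다르다면?
--                 break                    # 더 이상 그룹이 아니다
--             else:                        # character 다음 글자가 character 와 같은 글자라면?
--                 count += 1               # 같은 그룹이다 따라서count + 1
--         else:
--             count += 1                   # character 다음에 똑같은 글자가 없다면? 그 자체로 그룹 단어임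
--
--     return count
-- ===== SOURCE B (Python) =====
-- def count_group_character(word):
--     # Decompose the word into maximal runs of equal consecutive characters,
--     # recording each run's character and the index of its last element; the
--     # answer is the end-index of the first run whose character reappears in a
--     # later run, or len(word) if no character does.
--     n = len(word)
--     runs = []
--     i = 0
--     while i < n:
--         j = i
--         while j + 1 < n and word[j + 1] == word[j]:
--             j += 1
--         runs.append((word[i], j))
--         i = j + 1
--     while runs:
--         c, end = runs.pop(0)
--         if c in [c2 for c2, _ in runs]:
--             return end
--     return n
-- ===== Notes on version B (the rewrite author's own statement) =====
-- stated objective: alternative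
-- what changed: Replaces A's per-character loop (with a suffix-membership test and early break at each index) by a run-length decomposition: the word is split once into maximal runs of equal consecutive characters and the answer is the end-index of the first run whose character appears in a later run, else len(word).
import Mathlib
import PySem

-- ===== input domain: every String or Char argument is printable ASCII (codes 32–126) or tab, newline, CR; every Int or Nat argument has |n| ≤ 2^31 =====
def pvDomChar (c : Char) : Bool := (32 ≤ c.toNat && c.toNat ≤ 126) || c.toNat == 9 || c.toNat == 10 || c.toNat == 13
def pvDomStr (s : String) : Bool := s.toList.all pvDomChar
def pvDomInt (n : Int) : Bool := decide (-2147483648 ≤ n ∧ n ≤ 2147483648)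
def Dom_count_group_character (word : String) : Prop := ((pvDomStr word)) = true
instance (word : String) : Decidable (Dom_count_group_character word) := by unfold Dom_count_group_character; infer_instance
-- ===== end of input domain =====

-- B replaces A's per-character suffix-scan loop by a run-length decomposition scanned once; objective: alternative (no speed claim).

-- ===== PORT A =====
-- A's for-loop with early break, one step per index n; count is the running counter.
-- `character in word[n+1:]` is a single-character membership test in the suffix;
-- `word[n+1]` is only evaluated by Python when that membership holds (so n+1 is in
-- range there); the port tests `cs[n+1]? ≠ some c`, exact on every reachable input.
def cgcLoop (cs : List Char) (n : Nat) (count : Int) : Int :=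
  if h : n < cs.length then
    let c := cs[n]
    if c ∈ cs.drop (n + 1) then
      if cs[n + 1]? ≠ some c then count
      else cgcLoop cs (n + 1) (count + 1)
    else cgcLoop cs (n + 1) (count + 1)
  else count
termination_by cs.length - n

def count_group_character (word : String) : Int := cgcLoop word.toList 0 0

-- ===== PORT B =====
-- inner while: extend j while the next character equals the current one
def runEnd (cs : List Char) (j : Nat) : Nat :=
  if h : j + 1 < cs.length ∧ cs[j + 1]? = cs[j]? then runEnd cs (j + 1) else j
termination_by cs.length - j

-- needed by mkRuns's termination proof
theorem runEnd_ge (cs : List Char) (j : Nat) : j ≤ runEnd cs j := by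
  fun_induction runEnd cs j with
  | case1 j h ih => omega
  | case2 j h => omega

-- outer while: collect (run character, run end index) pairs
def mkRuns (cs : List Char) (i : Nat) : List (Char × Nat) :=
  if h : i < cs.length then
    (cs[i], runEnd cs i) :: mkRuns cs (runEnd cs i + 1)
  else []
termination_by cs.length - i
decreasing_by have := runEnd_ge cs i; omega

-- final while/pop loop: first run whose character occurs among the later runs
def scanRuns (cs : List Char) : List (Char × Nat) → Int
  | [] => (cs.length : Int)
  | (c, e) :: rest => if c ∈ rest.map Prod.fst then (e : Int) else scanRuns cs rest

def count_group_character_alt (word : String) : Int :=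
  scanRuns word.toList (mkRuns word.toList 0)

-- ===== PRECONDITION & SPEC =====
def Spec_count_group_character (word : String) (out : Int) : Prop := out = count_group_character_alt word
instance (word : String) (out : Int) : Decidable (Spec_count_group_character word out) := by unfold Spec_count_group_character; infer_instance

-- ===== CLAIM (what is proved, stated in full; the proofs are below) =====
def Claim_equal_count_group_character : Prop := ∀ (word : String), Dom_count_group_character word → Spec_count_group_character word (count_group_character word)

-- ===== LEMMAS AND PROOFS =====

theorem runEnd_lt (cs : List Char) (j : Nat) (h : j < cs.length) : runEnd cs j < cs.length := by
  fun_induction runEnd cs j with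
  | case1 j h' ih => exact ih h'.1
  | case2 j h' => exact h

theorem runEnd_const (cs : List Char) (j : Nat) :
    ∀ n, j ≤ n → n ≤ runEnd cs j → cs[n]? = cs[j]? := by
  fun_induction runEnd cs j with
  | case1 j h ih =>
    intro n hn1 hn2
    rcases Nat.eq_or_lt_of_le hn1 with rfl | hlt
    · rfl
    · exact (ih n hlt hn2).trans h.2
  | case2 j h =>
    intro n hn1 hn2
    obtain rfl : n = j := by omega
    rfl

theorem runEnd_stop (cs : List Char) (j : Nat) :
    ¬ (runEnd cs j + 1 < cs.length ∧ cs[runEnd cs j + 1]? = cs[runEnd cs j]?) := by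
  fun_induction runEnd cs j with
  | case1 j h ih => exact ih
  | case2 j h => exact h

theorem mem_drop_of_getElem? {cs : List Char} {m : Nat} {c : Char}
    (h : cs[m]? = some c) : ∀ k, k ≤ m → c ∈ cs.drop k := by
  intro k hk
  have : (cs.drop k)[m - k]? = some c := by
    rw [List.getElem?_drop, show k + (m - k) = m by omega]
    exact h
  exact List.mem_of_getElem? this

-- membership: the run characters from position k are exactly the characters of the suffix
theorem mem_mkRuns (cs : List Char) (x : Char) :
    ∀ k, (x ∈ (mkRuns cs k).map Prod.fst ↔ x ∈ cs.drop k) := by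
  intro k
  induction hm : cs.length - k using Nat.strong_induction_on generalizing k with
  | _ fuel ih =>
  by_cases hk : k < cs.length
  · rw [mkRuns, dif_pos hk]
    set j := runEnd cs k with hj
    have hkj : k ≤ j := runEnd_ge cs k
    have hjl : j < cs.length := runEnd_lt cs k hk
    have hrec := ih (cs.length - (j + 1)) (by omega) (j + 1) rfl
    -- positions k..j all hold cs[k]
    have hdrop : ∀ n, k ≤ n → n ≤ j → (x ∈ cs.drop n ↔ x = cs[k] ∨ x ∈ cs.drop (j + 1)) := by
      intro n hn1 hn2
      induction hd : j - n using Nat.strong_induction_on generalizing n with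
      | _ d ihd =>
      have hnl : n < cs.length := by omega
      have hcn : cs[n] = cs[k] := by
        have := runEnd_const cs k n hn1 hn2
        rw [List.getElem?_eq_getElem hnl, List.getElem?_eq_getElem hk] at this
        simpa using this
      rcases Nat.eq_or_lt_of_le hn2 with rfl | hlt
      · rw [List.drop_eq_getElem_cons hnl, hcn, List.mem_cons]
      · rw [List.drop_eq_getElem_cons hnl, hcn, List.mem_cons,
            ihd (j - (n + 1)) (by omega) (n + 1) (by omega) (by omega) rfl]
        tauto
    rw [List.map_cons, List.mem_cons, hrec, hdrop k (le_refl k) hkj]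
  · rw [mkRuns, dif_neg hk, List.drop_eq_nil_of_le (by omega)]
    simp

-- A's loop across one run: it counts through the run and at the run's last index either
-- breaks (char reappears later) or continues at the next run with count = index
theorem run_loop (cs : List Char) (i : Nat) (hi : i < cs.length) :
    ∀ n, i ≤ n → n ≤ runEnd cs i →
      cgcLoop cs n (n : Int) =
        if cs[i] ∈ cs.drop (runEnd cs i + 1) then ((runEnd cs i : Nat) : Int)
        else cgcLoop cs (runEnd cs i + 1) ((runEnd cs i + 1 : Nat) : Int) := by
  intro n hn1 hn2
  have hjl : runEnd cs i < cs.length := runEnd_lt cs i hi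
  induction hd : runEnd cs i - n using Nat.strong_induction_on generalizing n with
  | _ d ihd =>
  have hnl : n < cs.length := by omega
  have hcn : cs[n] = cs[i] := by
    have := runEnd_const cs i n hn1 hn2
    rw [List.getElem?_eq_getElem hnl, List.getElem?_eq_getElem hi] at this
    simpa using this
  rcases Nat.lt_or_ge n (runEnd cs i) with hlt | hge
  · -- n < runEnd cs i : inside the run, the next char is equal, so count += 1 either way
    have hn1l : n + 1 < cs.length := by omega
    have hceq : cs[n + 1]? = some cs[n] := by
      have e1 := runEnd_const cs i (n + 1) (by omega) (by omega)
      have e2 := runEnd_const cs i n hn1 hn2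
      rw [e1, ← e2]
      exact List.getElem?_eq_getElem hnl
    have hmem : cs[n] ∈ cs.drop (n + 1) :=
      mem_drop_of_getElem? hceq (n + 1) (le_refl _)
    rw [cgcLoop, dif_pos hnl, if_pos hmem, if_neg (by simp [hceq])]
    have hc : (n : Int) + 1 = ((n + 1 : Nat) : Int) := by push_cast; ring
    rw [hc]
    exact ihd (runEnd cs i - (n + 1)) (by omega) (n + 1) (by omega) (by omega) rfl
  · -- n = runEnd cs i : the run's last index
    obtain rfl : n = runEnd cs i := by omega
    rw [cgcLoop, dif_pos hnl, hcn]
    by_cases hmem : cs[i] ∈ cs.drop (runEnd cs i + 1)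
    · -- char reappears later: runEnd stopped here, so the next char differs and A breaks
      have hlen : runEnd cs i + 1 < cs.length := by
        by_contra hc
        rw [List.drop_eq_nil_of_le (by omega)] at hmem
        simp at hmem
      have hnext : cs[runEnd cs i + 1]? ≠ some cs[i] := by
        intro hc
        exact runEnd_stop cs i ⟨hlen, by rw [hc, List.getElem?_eq_getElem hnl, hcn]⟩
      rw [if_pos hmem, if_pos hnext, if_pos hmem]
    · -- char does not reappear: count += 1, continue at the next run's start
      rw [if_neg hmem, if_neg hmem]
      congr 1 <;> omega

theorem main_loop (cs : List Char) :
    ∀ i, i ≤ cs.length → cgcLoop cs i (i : Int) = scanRuns cs (mkRuns cs i) := by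
  intro i
  induction hm : cs.length - i using Nat.strong_induction_on generalizing i with
  | _ fuel ih =>
  intro hi
  by_cases hk : i < cs.length
  · rw [run_loop cs i hk i (le_refl i) (runEnd_ge cs i)]
    rw [mkRuns, dif_pos hk, scanRuns]
    by_cases hmem : cs[i] ∈ cs.drop (runEnd cs i + 1)
    · rw [if_pos hmem, if_pos ((mem_mkRuns cs cs[i] (runEnd cs i + 1)).mpr hmem)]
    · rw [if_neg hmem, if_neg (fun hc => hmem ((mem_mkRuns cs cs[i] (runEnd cs i + 1)).mp hc))]
      have hjl := runEnd_lt cs i hk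
      exact ih (cs.length - (runEnd cs i + 1)) (by have := runEnd_ge cs i; omega)
        (runEnd cs i + 1) rfl (by omega)
  · have : i = cs.length := by omega
    subst this
    rw [cgcLoop, dif_neg (by omega), mkRuns, dif_neg (by omega), scanRuns]

-- ===== VERDICT (by name: the statement is the Claim_ definition above) =====
theorem count_group_character_spec : Claim_equal_count_group_character := by
  intro word _
  unfold Spec_count_group_character count_group_character count_group_character_alt
  have := main_loop word.toList 0 (Nat.zero_le _)
  simpa using this
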